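-- pv_equiv track=rewrite | github.com/mhamzabaig/TA_PROJECT | project.py | FlipDict
-- ===== SOURCE A (Python) =====
-- def FlipDict(To_be_flipped):
--     flipped = {}
--     for key, value in To_be_flipped.items():
--         if value not in flipped:
--             flipped[value] = key
--         else:
--             flipped[value] = '(' + flipped[value] + '+' + key + ')'
--     return flipped
-- ===== SOURCE B (Python) =====
-- def FlipDict(To_be_flipped):
--     # First pass: group keys by value, preserving first-appearance order of values.
--     groups = {}
--     for key, value in To_be_flipped.items():
--         groups.setdefault(value, []).append(key)
--     # Second pass: fold each key list left-associatively into the merged key.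
--     flipped = {}
--     for value, keys in groups.items():
--         acc = keys[0]
--         for k in keys[1:]:
--             acc = '(' + acc + '+' + k + ')'
--         flipped[value] = acc
--     return flipped
-- ===== Notes on version B (the rewrite author's own statement) =====
-- stated objective: alternative
-- what changed: Replaces the single incremental collision-rebuild pass with a group-then-fold shape: first index keys by value into lists, then fold each list into the merged key string.
import Mathlib
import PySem

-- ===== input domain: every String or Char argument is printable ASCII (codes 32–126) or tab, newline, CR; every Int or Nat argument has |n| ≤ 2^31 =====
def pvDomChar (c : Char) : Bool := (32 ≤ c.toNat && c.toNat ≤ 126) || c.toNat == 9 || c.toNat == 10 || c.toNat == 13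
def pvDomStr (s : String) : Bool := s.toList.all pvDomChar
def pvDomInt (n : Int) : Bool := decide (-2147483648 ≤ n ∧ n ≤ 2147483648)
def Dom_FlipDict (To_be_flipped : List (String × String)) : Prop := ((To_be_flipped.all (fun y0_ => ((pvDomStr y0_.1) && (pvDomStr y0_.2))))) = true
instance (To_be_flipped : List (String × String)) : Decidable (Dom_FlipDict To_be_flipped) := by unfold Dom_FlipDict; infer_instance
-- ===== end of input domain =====

-- B replaces A's incremental collision-rebuild pass with group-keys-by-value then fold each group (alternative decomposition, same cost).


-- ===== PORT A =====
-- one step of A's loop body: branch on membership, then assign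
def flipStepA (d : PySem.Dict String String) (p : String × String) : PySem.Dict String String :=
  if d.contains p.2 = false then d.insert p.2 p.1
  else d.insert p.2 ("(" ++ d.getD p.2 "" ++ "+" ++ p.1 ++ ")")

def FlipDict (To_be_flipped : List (String × String)) : List (String × String) :=
  (To_be_flipped.foldl flipStepA PySem.Dict.empty).items

-- ===== PORT B =====
-- acc = keys[0]; for k in keys[1:]: acc = '(' + acc + '+' + k + ')'
def joinKeys (ks : List String) : String :=
  match ks with
  | [] => ""   -- unreachable: every group list holds at least one key
  | k :: rest => rest.foldl (fun acc k' => "(" ++ acc ++ "+" ++ k' ++ ")") k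

def FlipDict_alt (To_be_flipped : List (String × String)) : List (String × String) :=
  let groups := To_be_flipped.foldl (fun g p => g.modify p.2 [] (· ++ [p.1])) PySem.Dict.empty
  groups.items.map (fun q => (q.1, joinKeys q.2))

-- ===== PRECONDITION & SPEC =====
def Spec_FlipDict (To_be_flipped : List (String × String)) (out : List (String × String)) : Prop := out = FlipDict_alt To_be_flipped
instance (To_be_flipped : List (String × String)) (out : List (String × String)) : Decidable (Spec_FlipDict To_be_flipped out) := by unfold Spec_FlipDict; infer_instance

-- ===== CLAIM (what is proved, stated in full; the proofs are below) =====
def Claim_equal_FlipDict : Prop := ∀ (To_be_flipped : List (String × String)), Dom_FlipDict To_be_flipped → Spec_FlipDict To_be_flipped (FlipDict To_be_flipped)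

-- ===== LEMMAS AND PROOFS =====

def phiFD (q : String × List String) : String × String := (q.1, joinKeys q.2)

lemma joinKeys_append (ks : List String) (k : String) (h : ks ≠ []) :
    joinKeys (ks ++ [k]) = "(" ++ joinKeys ks ++ "+" ++ k ++ ")" := by
  cases ks with
  | nil => exact absurd rfl h
  | cons a rest => simp [joinKeys, List.foldl_append]

lemma contains_of_items_map (d : PySem.Dict String String) (g : PySem.Dict String (List String))
    (h : d.items = g.items.map phiFD) (v : String) : d.contains v = g.contains v := by
  simp [PySem.Dict.contains, h, List.any_map, Function.comp_def, phiFD]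

lemma flip_inv (l : List (String × String)) (d : PySem.Dict String String)
    (g : PySem.Dict String (List String))
    (hitems : d.items = g.items.map phiFD)
    (hne : ∀ q ∈ g.items, q.2 ≠ [])
    (hnd : g.keys.Nodup) :
    (l.foldl flipStepA d).items
      = ((l.foldl (fun g p => g.modify p.2 [] (· ++ [p.1])) g).items).map phiFD := by
  induction l generalizing d g with
  | nil => simpa using hitems
  | cons p rest ih =>
    obtain ⟨k, v⟩ := p
    simp only [List.foldl_cons]
    by_cases hc : g.contains v = true
    · -- collision branch
      have hdc : d.contains v = true := by rw [contains_of_items_map d g hitems]; exact hc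
      -- the existing group list at v
      obtain ⟨⟨v', ks⟩, hfind⟩ := List.any_eq_true.mp hc
      obtain ⟨hmem0, heq⟩ := hfind
      have hv : v' = v := by simpa using heq
      have hmem : (v, ks) ∈ g.items := hv ▸ hmem0
      have hget : g.get? v = some ks :=
        (PySem.Dict.get?_eq_some_iff_mem_items g v ks hnd).mpr hmem
      have hksne : ks ≠ [] := hne _ hmem
      have hgetD : g.getD v [] = ks := by simp [PySem.Dict.getD, hget]
      have hdnd : d.keys.Nodup := by
        have : d.keys = g.keys := by
          simp [PySem.Dict.keys, hitems, List.map_map, Function.comp_def, phiFD]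
        rw [this]; exact hnd
      have hdget : d.getD v "" = joinKeys ks := by
        have hdm : (v, joinKeys ks) ∈ d.items := by
          rw [hitems]; exact List.mem_map.mpr ⟨(v, ks), hmem, rfl⟩
        have := (PySem.Dict.get?_eq_some_iff_mem_items d v (joinKeys ks) hdnd).mpr hdm
        simp [PySem.Dict.getD, this]
      have hstepA : flipStepA d (k, v) = d.insert v ("(" ++ joinKeys ks ++ "+" ++ k ++ ")") := by
        simp [flipStepA, hdc, hdget]
      have hstepB : g.modify v [] (· ++ [k]) = g.insert v (ks ++ [k]) := by
        simp [PySem.Dict.modify, hgetD]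
      rw [hstepA, hstepB]
      apply ih
      · -- items relation after the paired updates
        rw [PySem.Dict.items_insert_of_contains d _ hdc,
            PySem.Dict.items_insert_of_contains g _ hc, hitems]
        rw [List.map_map, List.map_map]
        apply List.map_congr_left
        intro q hq
        by_cases hqv : q.1 = v
        · have : q = (v, ks) := by
            have h1 : g.get? q.1 = some q.2 :=
              (PySem.Dict.get?_eq_some_iff_mem_items g q.1 q.2 hnd).mpr hq
            rw [hqv, hget] at h1
            cases q; simp at hqv ⊢
            exact ⟨hqv, by injection h1 with h; exact h.symm⟩
          subst this
          simp [phiFD, Function.comp, joinKeys_append ks k hksne]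
        · simp [phiFD, Function.comp, hqv]
      · intro q hq
        rw [PySem.Dict.items_insert_of_contains g _ hc] at hq
        obtain ⟨q0, hq0, hq0eq⟩ := List.mem_map.mp hq
        by_cases hq0v : q0.1 = v
        · simp [hq0v] at hq0eq; rw [← hq0eq]; simp
        · simp [hq0v] at hq0eq; rw [← hq0eq]; exact hne _ hq0
      · exact PySem.Dict.nodup_keys_insert g v _ hnd
    · -- fresh value branch
      have hc' : g.contains v = false := by simpa using hc
      have hdc : d.contains v = false := by rw [contains_of_items_map d g hitems]; exact hc'
      have hstepA : flipStepA d (k, v) = d.insert v k := by simp [flipStepA, hdc]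
      have hgetD : g.getD v [] = [] := PySem.Dict.getD_of_not_contains g [] hc'
      have hstepB : g.modify v [] (· ++ [k]) = g.insert v [k] := by
        simp [PySem.Dict.modify, hgetD]
      rw [hstepA, hstepB]
      apply ih
      · rw [PySem.Dict.items_insert_of_not_contains d _ hdc,
            PySem.Dict.items_insert_of_not_contains g _ hc', hitems]
        simp [phiFD, joinKeys]
      · intro q hq
        rw [PySem.Dict.items_insert_of_not_contains g _ hc'] at hq
        rcases List.mem_append.mp hq with h | h
        · exact hne _ h
        · simp at h; rw [h]; simp
      · exact PySem.Dict.nodup_keys_insert g v _ hnd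

-- ===== VERDICT (by name: the statement is the Claim_ definition above) =====
theorem FlipDict_spec : Claim_equal_FlipDict := by
  intro l _
  show FlipDict l = FlipDict_alt l
  unfold FlipDict FlipDict_alt
  exact flip_inv l PySem.Dict.empty PySem.Dict.empty rfl (by simp [PySem.Dict.empty])
    PySem.Dict.nodup_keys_empty
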